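-- pv_equiv track=rewrite | github.com/abeejuice/adult-vaccination-tool- | api/main.py | get_dominant_column
-- ===== SOURCE A (Python) =====
-- COLUMN_PRIORITY = {
--     "pregnancy": 5,   # safety-critical — always overrides
--     "high_risk": 4,   # CKD, HIV, cancer, transplant
--     "at_risk":   3,   # DM, liver, heart, lung
--     "special":   2,   # travel, HCP
--     "lifestyle": 1,
-- }
--
-- CONDITION_TO_COLUMN = {
--     "diabetes":   "at_risk",
--     "liver":      "at_risk",
--     "heart":      "at_risk",
--     "lung":       "at_risk",
--     "kidney":     "high_risk",
--     "cancer":     "high_risk",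
--     "hiv":        "high_risk",
--     "pregnancy":  "pregnancy",
--     "travel":     "special",
--     "healthcare": "special",
--     "lifestyle":  "lifestyle",
-- }
--
-- def get_dominant_column(all_conditions: list[str], age: int | None) -> str:
--     """Pick the matrix column using clinical dominance rules."""
--     # Pregnancy always overrides — safety constraint supersedes age and all conditions
--     if "pregnancy" in all_conditions:
--         return "pregnancy"
--     # Age ≥50 overrides ALL condition-based columns (including high_risk)
--     # condition_data for all detected conditions is still appended for dose details
--     if age is not None and age >= 50:
--         return "50_plus"
--     if not all_conditions:
--         return "at_risk"
--     cols = [CONDITION_TO_COLUMN.get(c, "at_risk") for c in all_conditions]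
--     return max(cols, key=lambda c: COLUMN_PRIORITY.get(c, 0))
-- ===== SOURCE B (Python) =====
-- CONDITION_TO_COLUMN = {
--     "diabetes":   "at_risk",
--     "liver":      "at_risk",
--     "heart":      "at_risk",
--     "lung":       "at_risk",
--     "kidney":     "high_risk",
--     "cancer":     "high_risk",
--     "hiv":        "high_risk",
--     "pregnancy":  "pregnancy",
--     "travel":     "special",
--     "healthcare": "special",
--     "lifestyle":  "lifestyle",
-- }
--
-- def get_dominant_column(all_conditions: list[str], age: int | None) -> str:
--     """Pick the matrix column using clinical dominance rules."""
--     if "pregnancy" in all_conditions: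
--         return "pregnancy"
--     if age is not None and age >= 50:
--         return "50_plus"
--     if not all_conditions:
--         return "at_risk"
--     # scan tiers in descending priority; return the first tier some condition maps to
--     for col in ("high_risk", "at_risk", "special", "lifestyle"):
--         if any(CONDITION_TO_COLUMN.get(c, "at_risk") == col for c in all_conditions):
--             return col
--     return "at_risk"  # unreachable: unknown conditions map to "at_risk"
-- ===== Notes on version B (the rewrite author's own statement) =====
-- stated objective: simpler
-- what changed: Replaces the map-to-columns-then-max-with-priority-key computation by a direct scan of the four tiers in descending priority, returning the first tier any condition maps to; no priority table or max call is needed.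
import Mathlib
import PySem

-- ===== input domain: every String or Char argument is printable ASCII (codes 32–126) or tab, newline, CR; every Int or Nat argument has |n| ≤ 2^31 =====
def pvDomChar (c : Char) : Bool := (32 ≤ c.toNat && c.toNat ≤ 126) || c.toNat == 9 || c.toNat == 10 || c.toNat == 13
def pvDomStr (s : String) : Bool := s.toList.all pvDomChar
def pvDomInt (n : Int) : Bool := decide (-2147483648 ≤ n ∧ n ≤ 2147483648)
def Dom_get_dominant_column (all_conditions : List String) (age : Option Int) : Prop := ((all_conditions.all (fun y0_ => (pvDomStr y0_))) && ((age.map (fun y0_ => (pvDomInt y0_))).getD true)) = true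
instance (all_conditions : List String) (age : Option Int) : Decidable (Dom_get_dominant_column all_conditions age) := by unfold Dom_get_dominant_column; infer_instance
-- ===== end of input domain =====

-- B replaces A's map-every-condition-to-a-column + max-by-priority step by a scan of the four
-- tiers in descending priority that returns the first tier any condition maps to (same cost).

-- ===== PORT A =====
def CONDITION_TO_COLUMN : PySem.Dict String String :=
  PySem.Dict.ofList [("diabetes", "at_risk"), ("liver", "at_risk"), ("heart", "at_risk"), ("lung", "at_risk"),
   ("kidney", "high_risk"), ("cancer", "high_risk"), ("hiv", "high_risk"),
   ("pregnancy", "pregnancy"), ("travel", "special"), ("healthcare", "special"),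
   ("lifestyle", "lifestyle")]

def COLUMN_PRIORITY : PySem.Dict String Int :=
  PySem.Dict.ofList [("pregnancy", 5), ("high_risk", 4), ("at_risk", 3), ("special", 2), ("lifestyle", 1)]

def get_dominant_column (all_conditions : List String) (age : Option Int) : String :=
  if all_conditions.contains "pregnancy" then "pregnancy"
  else if (match age with | some a => decide (50 ≤ a) | none => false) then "50_plus"
  else if all_conditions = [] then "at_risk"
  else
    let cols := all_conditions.map (fun c => PySem.Dict.getD CONDITION_TO_COLUMN c "at_risk")
    match PySem.List.max? cols (fun c => PySem.Dict.getD COLUMN_PRIORITY c 0) with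
    | some m => m
    | none => "at_risk"  -- unreachable: cols nonempty (Python max would raise only on empty)


-- ===== PORT B =====
-- scan the tiers in descending priority, return the first one some condition maps to
def firstTier (tiers : List String) (all_conditions : List String) : String :=
  match tiers with
  | [] => "at_risk"  -- unreachable fallback
  | t :: ts =>
    if all_conditions.any (fun c => PySem.Dict.getD CONDITION_TO_COLUMN c "at_risk" == t) then t
    else firstTier ts all_conditions

def get_dominant_column_alt (all_conditions : List String) (age : Option Int) : String :=
  if all_conditions.contains "pregnancy" then "pregnancy"
  else if (match age with | some a => decide (50 ≤ a) | none => false) then "50_plus"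
  else if all_conditions = [] then "at_risk"
  else firstTier ["high_risk", "at_risk", "special", "lifestyle"] all_conditions


-- ===== PRECONDITION & SPEC =====
def Spec_get_dominant_column (all_conditions : List String) (age : Option Int) (out : String) : Prop := out = get_dominant_column_alt all_conditions age
instance (all_conditions : List String) (age : Option Int) (out : String) : Decidable (Spec_get_dominant_column all_conditions age out) := by unfold Spec_get_dominant_column; infer_instance

-- ===== CLAIM (what is proved, stated in full; the proofs are below) =====
def Claim_equal_get_dominant_column : Prop := ∀ (all_conditions : List String) (age : Option Int), Dom_get_dominant_column all_conditions age → Spec_get_dominant_column all_conditions age (get_dominant_column all_conditions age)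

-- ===== LEMMAS AND PROOFS =====


def cget (c : String) : String := PySem.Dict.getD CONDITION_TO_COLUMN c "at_risk"

def prio (m : String) : Int := PySem.Dict.getD COLUMN_PRIORITY m 0

lemma getD_eq_cget (c : String) : PySem.Dict.getD CONDITION_TO_COLUMN c "at_risk" = cget c := rfl

lemma cget_cases (c : String) (h : c ≠ "pregnancy") :
    cget c = "high_risk" ∨ cget c = "at_risk" ∨ cget c = "special" ∨ cget c = "lifestyle" := by
  by_cases h1 : "diabetes" = c <;> by_cases h2 : "liver" = c <;> by_cases h3 : "heart" = c <;>
    by_cases h4 : "lung" = c <;> by_cases h5 : "kidney" = c <;> by_cases h6 : "cancer" = c <;>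
    by_cases h7 : "hiv" = c <;> by_cases h8 : "travel" = c <;> by_cases h9 : "healthcare" = c <;>
    by_cases h10 : "lifestyle" = c
  all_goals first
    | (subst_vars; decide)
    | (have hit : CONDITION_TO_COLUMN.items =
          [("diabetes", "at_risk"), ("liver", "at_risk"), ("heart", "at_risk"), ("lung", "at_risk"),
           ("kidney", "high_risk"), ("cancer", "high_risk"), ("hiv", "high_risk"),
           ("pregnancy", "pregnancy"), ("travel", "special"), ("healthcare", "special"),
           ("lifestyle", "lifestyle")] := by decide
       have e0 : ("diabetes" == c) = false := by simp [h1]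
       have e1 : ("liver" == c) = false := by simp [h2]
       have e2 : ("heart" == c) = false := by simp [h3]
       have e3 : ("lung" == c) = false := by simp [h4]
       have e4 : ("kidney" == c) = false := by simp [h5]
       have e5 : ("cancer" == c) = false := by simp [h6]
       have e6 : ("hiv" == c) = false := by simp [h7]
       have e7 : ("travel" == c) = false := by simp [h8]
       have e8 : ("healthcare" == c) = false := by simp [h9]
       have e9 : ("lifestyle" == c) = false := by simp [h10]
       have e10 : ("pregnancy" == c) = false := by simp [Ne.symm h]
       simp [cget, PySem.Dict.getD, PySem.Dict.get?, hit, List.find?, e0, e1, e2, e3, e4, e5, e6, e7, e8, e9, e10])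

lemma max?_cons {α κ : Type} [LT κ] [DecidableLT κ] (key : α → κ) (l : List α) (m : α) :
    PySem.List.max? (m :: l) key = some (List.foldl (fun a x => if key a < key x then x else a) m l) := by
  induction l using List.reverseRecOn with
  | nil => rfl
  | append_singleton l c ih =>
    rw [show m :: (l ++ [c]) = (m :: l) ++ [c] from rfl, PySem.List.max?, List.foldl_append]
    rw [PySem.List.max?] at ih
    rw [ih, List.foldl_append]
    simp only [List.foldl_cons, List.foldl_nil]
    by_cases h : key (List.foldl (fun a x => if key a < key x then x else a) m l) < key c <;> simp [h]

def chain4 (cs : List String) (m : String) : String :=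
  if cs.any (fun c => cget c == "high_risk") || m == "high_risk" then "high_risk"
  else if cs.any (fun c => cget c == "at_risk") || m == "at_risk" then "at_risk"
  else if cs.any (fun c => cget c == "special") || m == "special" then "special"
  else "lifestyle"

lemma foldl_chain4 (cs : List String) (m : String) (hcs : "pregnancy" ∉ cs)
    (hm : m = "high_risk" ∨ m = "at_risk" ∨ m = "special" ∨ m = "lifestyle") :
    List.foldl (fun a c => if prio a < prio (cget c) then cget c else a) m cs = chain4 cs m := by
  induction cs generalizing m with
  | nil =>
    rcases hm with h | h | h | h <;> subst h <;> simp [chain4]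
  | cons c cs ih =>
    have hc : c ≠ "pregnancy" := fun h => hcs (h ▸ List.mem_cons_self)
    have hcs' : "pregnancy" ∉ cs := fun h => hcs (List.mem_cons_of_mem _ h)
    simp only [List.foldl_cons]
    rcases cget_cases c hc with hcg | hcg | hcg | hcg <;>
      rcases hm with h | h | h | h <;> subst h <;>
      rw [hcg] <;>
      first
        | (rw [if_pos (by decide)]; rw [ih _ hcs' (by simp)]; simp [chain4, hcg])
        | (rw [if_neg (by decide)]; rw [ih _ hcs' (by simp)]; simp [chain4, hcg])

-- ===== VERDICT (by name: the statement is the Claim_ definition above) =====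
theorem get_dominant_column_spec : Claim_equal_get_dominant_column := by
  intro cs age _
  unfold Spec_get_dominant_column get_dominant_column get_dominant_column_alt
  by_cases hp : "pregnancy" ∈ cs
  · simp [hp]
  · simp only [List.contains_iff_mem, hp, if_false]
    cases hage : (match age with | some a => decide (50 ≤ a) | none => false) with
    | true => simp
    | false =>
      simp only [if_false, Bool.false_eq_true]
      cases cs with
      | nil => simp
      | cons c0 rest =>
        have hnp : "pregnancy" ∉ (c0 :: rest) := by
          simpa [List.contains_iff_mem] using hp
        have hc0 : c0 ≠ "pregnancy" := fun h => hnp (h ▸ List.mem_cons_self)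
        have hrest : "pregnancy" ∉ rest := fun h => hnp (List.mem_cons_of_mem _ h)
        simp only [if_neg (List.cons_ne_nil c0 rest)]
        show (match PySem.List.max? ((c0 :: rest).map (fun c => cget c)) prio with
              | some m => m | none => "at_risk")
            = firstTier ["high_risk", "at_risk", "special", "lifestyle"] (c0 :: rest)
        simp only [List.map_cons]
        rw [max?_cons prio]
        simp only [List.foldl_map]
        rw [foldl_chain4 rest (cget c0) hrest (cget_cases c0 hc0)]
        rcases cget_cases c0 hc0 with hcg | hcg | hcg | hcg <;>
          rw [hcg] <;>
          by_cases h1 : ∃ x ∈ rest, cget x = "high_risk" <;>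
          by_cases h2 : ∃ x ∈ rest, cget x = "at_risk" <;>
          by_cases h3 : ∃ x ∈ rest, cget x = "special" <;>
          simp [chain4, firstTier, List.any_cons, List.any_eq_true, beq_iff_eq, getD_eq_cget, hcg, h1, h2, h3]
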